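-- pv_equiv track=rewrite | github.com/oakleyfoy/rw-tournament-software | backend/app/services/schedule_sequence.py | _build_day_round_groups
-- ===== SOURCE A (Python) =====
-- from typing import Dict, List, Optional, Set, Tuple
--
-- def _build_day_round_groups(
--     num_team_rounds: int,
--     num_days: int,
-- ) -> List[set]:
--     """
--     Dynamically assign team-rounds to tournament days.
--
--     Rule: 2 team-rounds per day (max 2 matches per team per day).
--     If there are more days than needed, extra days get no assigned rounds
--     but can still receive overflow.
--
--     Examples:
--         3 rounds, 2 days  -> [{0,1}, {2}]
--         5 rounds, 3 days  -> [{0,1}, {2,3}, {4}]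
--         5 rounds, 4 days  -> [{0,1}, {2,3}, {4}, set()]
--         4 rounds, 2 days  -> [{0,1}, {2,3}]
--         3 rounds, 3 days  -> [{0,1}, {2}, set()]
--     """
--     groups: List[set] = [set() for _ in range(num_days)]
--     for tr in range(num_team_rounds):
--         day_idx = min(tr // 2, num_days - 1)  # cap to last day
--         groups[day_idx].add(tr)
--     return groups
-- ===== SOURCE B (Python) =====
-- def _build_day_round_groups(num_team_rounds, num_days):
--     if num_days <= 0:
--         return []
--     groups = [set(range(2 * d, min(2 * d + 2, num_team_rounds)))
--               for d in range(num_days - 1)]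
--     groups.append(set(range(2 * (num_days - 1), num_team_rounds)))
--     return groups
-- ===== Notes on version B (the rewrite author's own statement) =====
-- stated objective: alternative
-- what changed: B iterates over days and builds each day's set as one integer range clipped to num_team_rounds (the last day taking all overflow rounds), instead of A's loop over team-rounds that mutates a per-day set.
import Mathlib
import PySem

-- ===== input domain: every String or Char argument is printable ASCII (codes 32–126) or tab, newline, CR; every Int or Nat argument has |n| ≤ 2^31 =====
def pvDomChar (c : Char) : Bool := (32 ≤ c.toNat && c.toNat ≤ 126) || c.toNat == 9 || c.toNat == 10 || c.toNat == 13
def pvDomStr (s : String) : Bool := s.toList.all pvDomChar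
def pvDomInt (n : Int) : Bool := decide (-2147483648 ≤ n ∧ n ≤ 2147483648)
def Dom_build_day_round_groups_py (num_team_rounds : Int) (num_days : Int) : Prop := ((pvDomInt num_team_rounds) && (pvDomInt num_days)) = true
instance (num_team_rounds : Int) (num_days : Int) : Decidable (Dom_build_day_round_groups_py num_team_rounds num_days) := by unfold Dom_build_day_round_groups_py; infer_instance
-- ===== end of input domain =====

-- B builds each day's round set as one clipped integer range (loop over days) instead of A's per-round loop mutating sets: an alternative decomposition of the same cost.

-- ===== PORT A =====
def build_day_round_groups_py (num_team_rounds : Int) (num_days : Int) : List (List Int) :=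
  (PySem.List.pyRange 0 num_team_rounds 1).foldl
    (fun groups tr =>
      let day_idx := min (PySem.Int.floordiv tr 2) (num_days - 1)
      PySem.List.pySetD groups day_idx
        (PySem.Set.add (PySem.List.pyGetD groups day_idx []) tr))
    (List.replicate num_days.toNat [])

-- ===== PORT B =====
def build_day_round_groups_py_alt (num_team_rounds : Int) (num_days : Int) : List (List Int) :=
  if num_days ≤ 0 then []
  else
    (PySem.List.pyRange 0 (num_days - 1) 1).map
      (fun d => PySem.Set.ofList (PySem.List.pyRange (2*d) (min (2*d+2) num_team_rounds) 1))
    ++ [PySem.Set.ofList (PySem.List.pyRange (2*(num_days-1)) num_team_rounds 1)]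

-- ===== PRECONDITION & SPEC =====
-- Pre_ excludes exactly the inputs where A raises IndexError (num_days ≤ 0 while num_team_rounds ≥ 1:
-- the loop indexes into an empty groups list).
def Pre_build_day_round_groups_py (num_team_rounds : Int) (num_days : Int) : Prop :=
  1 ≤ num_days ∨ num_team_rounds ≤ 0
instance (num_team_rounds : Int) (num_days : Int) : Decidable (Pre_build_day_round_groups_py num_team_rounds num_days) := by unfold Pre_build_day_round_groups_py; infer_instance
def pvWitness_build_day_round_groups_py : Int × Int := (5, 3)

def Spec_build_day_round_groups_py (num_team_rounds : Int) (num_days : Int) (out : List (List Int)) : Prop := out = build_day_round_groups_py_alt num_team_rounds num_days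
instance (num_team_rounds : Int) (num_days : Int) (out : List (List Int)) : Decidable (Spec_build_day_round_groups_py num_team_rounds num_days out) := by unfold Spec_build_day_round_groups_py; infer_instance

-- ===== CLAIM (what is proved, stated in full; the proofs are below) =====
def Claim_equal_build_day_round_groups_py : Prop := ∀ (num_team_rounds : Int) (num_days : Int), Dom_build_day_round_groups_py num_team_rounds num_days → Pre_build_day_round_groups_py num_team_rounds num_days → Spec_build_day_round_groups_py num_team_rounds num_days (build_day_round_groups_py num_team_rounds num_days)

-- ===== LEMMAS AND PROOFS =====

-- the contents of day j (0-based) under B's bucketing, for 1 ≤ nd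
def pvBucket (ntr nd : Int) (j : Nat) : List Int :=
  if (j:Int) < nd - 1 then PySem.List.pyRange (2*(j:Int)) (min (2*(j:Int)+2) ntr) 1
  else PySem.List.pyRange (2*(nd-1)) ntr 1

lemma alt_eq (ntr nd : Int) : build_day_round_groups_py_alt ntr nd =
    if nd ≤ 0 then [] else
    (PySem.List.pyRange 0 (nd - 1) 1).map
      (fun d => PySem.List.pyRange (2*d) (min (2*d+2) ntr) 1)
    ++ [PySem.List.pyRange (2*(nd-1)) ntr 1] := by
  unfold build_day_round_groups_py_alt
  simp only [PySem.Set.ofList_eq_self_of_nodup _ (PySem.List.nodup_pyRange_one _ _)]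

lemma length_alt (ntr nd : Int) (h : 1 ≤ nd) : (build_day_round_groups_py_alt ntr nd).length = nd.toNat := by
  rw [alt_eq, if_neg (by omega)]
  simp [PySem.List.length_pyRange_one]
  omega

lemma getElem?_alt (ntr nd : Int) (h : 1 ≤ nd) (j : Nat) (hj : j < nd.toNat) :
    (build_day_round_groups_py_alt ntr nd)[j]? = some (pvBucket ntr nd j) := by
  rw [alt_eq, if_neg (by omega)]
  by_cases hlt : (j:Int) < nd - 1
  · rw [List.getElem?_append_left (by simp [PySem.List.length_pyRange_one]; omega)]
    rw [List.getElem?_map]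
    rw [PySem.List.getElem?_pyRange_one]
    rw [pvBucket, if_pos hlt]
    simp
    omega
  · rw [List.getElem?_append_right (by simp [PySem.List.length_pyRange_one]; omega)]
    have : j - ((PySem.List.pyRange 0 (nd-1) 1).map
      (fun d => PySem.List.pyRange (2*d) (min (2*d+2) ntr) 1)).length = 0 := by
      simp [PySem.List.length_pyRange_one]; omega
    rw [this]
    rw [pvBucket, if_neg hlt]
    rfl

lemma bucket_unchanged (nd n : Int) (h : 1 ≤ nd) (j : Nat) (hj : j < nd.toNat)
    (hne : (j:Int) ≠ min (n / 2) (nd-1)) : pvBucket n nd j = pvBucket (n+1) nd j := by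
  unfold pvBucket
  split_ifs with hlt
  · by_cases hle : 2*(j:Int)+2 ≤ n
    · rw [min_eq_left hle, min_eq_left (by omega)]
    · rw [PySem.List.pyRange_one_eq_nil (by omega), PySem.List.pyRange_one_eq_nil (by omega)]
  · rw [PySem.List.pyRange_one_eq_nil (by omega), PySem.List.pyRange_one_eq_nil (by omega)]

lemma bucket_add (nd n : Int) (h : 1 ≤ nd) (hn : 0 ≤ n) :
    PySem.Set.add (pvBucket n nd (min (n / 2) (nd-1)).toNat) n
      = pvBucket (n+1) nd (min (n / 2) (nd-1)).toNat := by
  have hc : ((min (n / 2) (nd-1)).toNat : Int) = min (n / 2) (nd-1) := by omega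
  unfold pvBucket
  rw [hc]
  split_ifs with hlt
  · have hd : min (n / 2) (nd-1) = n / 2 := by omega
    rw [hd, min_eq_right (by omega), min_eq_right (by omega)]
    rw [PySem.Set.add_of_not_mem (by simp [PySem.List.mem_pyRange_one])]
    rw [PySem.List.pyRange_one_succ_right (by omega)]
  · have hd : min (n / 2) (nd-1) = nd - 1 := by omega
    rw [hd] at *
    rw [PySem.Set.add_of_not_mem (by simp [PySem.List.mem_pyRange_one])]
    rw [PySem.List.pyRange_one_succ_right (by omega)]

lemma alt_nonpos (ntr nd : Int) (h : 1 ≤ nd) (hle : ntr ≤ 0) :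
    build_day_round_groups_py_alt ntr nd = List.replicate nd.toNat [] := by
  apply List.ext_getElem?
  intro j
  by_cases hj : j < nd.toNat
  · rw [getElem?_alt ntr nd h j hj, List.getElem?_replicate, if_pos hj]
    unfold pvBucket
    split_ifs with hlt
    · rw [PySem.List.pyRange_one_eq_nil (by omega)]
    · rw [PySem.List.pyRange_one_eq_nil (by omega)]
  · rw [List.getElem?_eq_none (by rw [length_alt ntr nd h]; omega),
        List.getElem?_eq_none (by simp; omega)]

lemma step_eq (nd n : Int) (h : 1 ≤ nd) (hn : 0 ≤ n) :
    PySem.List.pySetD (build_day_round_groups_py_alt n nd) (min (PySem.Int.floordiv n 2) (nd - 1))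
      (PySem.Set.add (PySem.List.pyGetD (build_day_round_groups_py_alt n nd) (min (PySem.Int.floordiv n 2) (nd - 1)) []) n)
      = build_day_round_groups_py_alt (n+1) nd := by
  rw [PySem.Int.floordiv_eq_ediv_of_pos (by omega)]
  have hd0 : (0:Int) ≤ min (n / 2) (nd - 1) := by omega
  have hdlt : (min (n / 2) (nd - 1)).toNat < nd.toNat := by omega
  rw [PySem.List.pySetD_of_nonneg _ _ hd0, PySem.List.pyGetD_of_nonneg _ _ hd0]
  have hget : (build_day_round_groups_py_alt n nd).getD (min (n / 2) (nd - 1)).toNat []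
      = pvBucket n nd (min (n / 2) (nd - 1)).toNat := by
    rw [List.getD_eq_getElem?_getD, getElem?_alt n nd h _ hdlt]
    rfl
  rw [hget, bucket_add nd n h hn]
  apply List.ext_getElem?
  intro j
  by_cases hj : j < nd.toNat
  · rw [List.getElem?_set, getElem?_alt _ _ h j hj, getElem?_alt _ _ h j hj]
    by_cases hje : (min (n / 2) (nd - 1)).toNat = j
    · rw [if_pos hje, if_pos (by rw [length_alt _ _ h]; omega), hje]
    · rw [if_neg hje]
      rw [bucket_unchanged nd n h j hj (by omega)]
  · rw [List.getElem?_eq_none (by rw [List.length_set, length_alt _ _ h]; omega),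
        List.getElem?_eq_none (by rw [length_alt _ _ h]; omega)]

lemma loop_eq (nd : Int) (h : 1 ≤ nd) (n : Nat) :
    (PySem.List.pyRange 0 (n:Int) 1).foldl
      (fun groups tr =>
        let day_idx := min (PySem.Int.floordiv tr 2) (nd - 1)
        PySem.List.pySetD groups day_idx
          (PySem.Set.add (PySem.List.pyGetD groups day_idx []) tr))
      (List.replicate nd.toNat []) = build_day_round_groups_py_alt (n:Int) nd := by
  induction n with
  | zero =>
    rw [PySem.List.pyRange_one_eq_nil (by omega), List.foldl_nil]
    rw [show ((0:Nat):Int) = 0 from rfl, alt_nonpos 0 nd h (by omega)]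
  | succ n ih =>
    have hc : ((n+1 : Nat) : Int) = (n:Int) + 1 := by push_cast; ring
    rw [hc, PySem.List.pyRange_one_succ_right (by positivity), List.foldl_append, ih,
        List.foldl_cons, List.foldl_nil]
    exact step_eq nd n h (by positivity)

-- ===== VERDICT (by name: the statement is the Claim_ definition above) =====
theorem build_day_round_groups_py_spec : Claim_equal_build_day_round_groups_py := by
  intro ntr nd _ hpre
  unfold Spec_build_day_round_groups_py
  unfold Pre_build_day_round_groups_py at hpre
  by_cases hnd : 1 ≤ nd
  · by_cases hntr : 0 ≤ ntr
    · have hcast : ntr = ((ntr.toNat : Nat) : Int) := by omega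
      rw [hcast, build_day_round_groups_py, loop_eq nd hnd ntr.toNat]
    · rw [build_day_round_groups_py, PySem.List.pyRange_one_eq_nil (by omega), List.foldl_nil,
          alt_nonpos ntr nd hnd (by omega)]
  · have hnt : ntr ≤ 0 := by tauto
    rw [build_day_round_groups_py, PySem.List.pyRange_one_eq_nil (by omega),
        build_day_round_groups_py_alt, if_pos (by omega)]
    simp
    omega
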